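-- pv_equiv track=rewrite | github.com/mahi7000/A2SV_Solved_Questions | Dominant_Character.py | findMinLength
-- ===== SOURCE A (Python) =====
-- def findMinLength(n, s):
--     prefix_a = [0] * (n + 1)
--     prefix_b = [0] * (n + 1)
--     prefix_c = [0] * (n + 1)
--
--     for i in range(n):
--         prefix_a[i + 1] = prefix_a[i] + (1 if s[i] == 'a' else 0)
--         prefix_b[i + 1] = prefix_b[i] + (1 if s[i] == 'b' else 0)
--         prefix_c[i + 1] = prefix_c[i] + (1 if s[i] == 'c' else 0)
--
--     for length in range(2, 8):
--         if length > n: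
--             break
--
--         for i in range(n - length + 1):
--             a_count = prefix_a[i + length] - prefix_a[i]
--             b_count = prefix_b[i + length] - prefix_b[i]
--             c_count = prefix_c[i + length] - prefix_c[i]
--
--             if a_count > b_count and a_count > c_count:
--                 return length
--
--     return -1
-- ===== SOURCE B (Python) =====
-- def findMinLength(n, s):
--     # Position-major search: for each start, grow the window with incremental
--     # counts and record the first (= shortest) qualifying length; keep the
--     # minimum over all starts.
--     best = 8
--     for i in range(n):
--         a = b = c = 0
--         for j in range(i, min(i + 7, n)):
--             ch = s[j]
--             if ch == 'a':
--                 a += 1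
--             elif ch == 'b':
--                 b += 1
--             elif ch == 'c':
--                 c += 1
--             if a > b and a > c and j - i + 1 >= 2:
--                 if j - i + 1 < best:
--                     best = j - i + 1
--                 break
--     return best if best < 8 else -1
-- ===== Notes on version B (the rewrite author's own statement) =====
-- stated objective: alternative
-- what changed: Inverted search order and state: instead of A's length-major scan over precomputed prefix-sum arrays, B runs start-position-major, growing each window with incrementally maintained a/b/c counters, taking the first qualifying length per start (then breaking) and keeping the minimum over all starts; equal because both compute the least qualifying length in 2..7.
import Mathlib
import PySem

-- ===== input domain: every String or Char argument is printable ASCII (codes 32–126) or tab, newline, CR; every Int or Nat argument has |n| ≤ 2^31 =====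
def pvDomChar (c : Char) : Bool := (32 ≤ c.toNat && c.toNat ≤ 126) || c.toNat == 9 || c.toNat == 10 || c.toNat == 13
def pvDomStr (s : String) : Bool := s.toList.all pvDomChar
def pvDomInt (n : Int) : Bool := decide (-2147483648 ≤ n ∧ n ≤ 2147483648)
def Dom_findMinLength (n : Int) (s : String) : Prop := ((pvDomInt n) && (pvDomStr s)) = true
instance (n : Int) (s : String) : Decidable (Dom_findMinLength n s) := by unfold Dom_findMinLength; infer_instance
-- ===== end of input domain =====

-- B replaces A's length-major scan over three prefix-sum arrays by a start-position-major
-- scan with incrementally maintained a/b/c counters and a running minimum (objective: alternative).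

-- ===== PORT A =====
-- The prefix arrays are written sequentially (slot i+1 at step i), so the in-place
-- writes are transcribed as appends of the same values; prefix[i] read = pyGetD at i.
def pvBuildA (cs : List Char) (n : Int) : List Int × List Int × List Int :=
  (PySem.List.pyRange 0 n 1).foldl
    (fun st i =>
      let ch := PySem.List.pyGetD cs i ' '   -- s[i]; in range under Pre_
      (st.1   ++ [PySem.List.pyGetD st.1   i 0 + (if ch = 'a' then 1 else 0)],
       st.2.1 ++ [PySem.List.pyGetD st.2.1 i 0 + (if ch = 'b' then 1 else 0)],
       st.2.2 ++ [PySem.List.pyGetD st.2.2 i 0 + (if ch = 'c' then 1 else 0)]))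
    ([0], [0], [0])

-- inner 'for i in range(n - length + 1)' with early return
def pvInnerA (pa pb pc : List Int) (len : Int) : List Int → Option Int
  | [] => none
  | i :: rest =>
    let aC := PySem.List.pyGetD pa (i + len) 0 - PySem.List.pyGetD pa i 0
    let bC := PySem.List.pyGetD pb (i + len) 0 - PySem.List.pyGetD pb i 0
    let cC := PySem.List.pyGetD pc (i + len) 0 - PySem.List.pyGetD pc i 0
    if aC > bC ∧ aC > cC then some len else pvInnerA pa pb pc len rest

-- outer 'for length in range(2, 8)' with the break
def pvOuterA (n : Int) (pa pb pc : List Int) : List Int → Int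
  | [] => -1
  | l :: rest =>
    if l > n then -1
    else
      match pvInnerA pa pb pc l (PySem.List.pyRange 0 (n - l + 1) 1) with
      | some r => r
      | none => pvOuterA n pa pb pc rest

def findMinLength (n : Int) (s : String) : Int :=
  let p := pvBuildA s.toList n
  pvOuterA n p.1 p.2.1 p.2.2 (PySem.List.pyRange 2 8 1)

-- ===== PORT B =====
-- inner 'for j in range(i, min(i + 7, n))' carrying the counters, with the break
-- transcribed as an Option return (the found length)
def pvFirstAt (cs : List Char) (i : Int) : Int × Int × Int → List Int → Option Int
  | _, [] => none
  | (a, b, c), j :: rest =>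
    let ch := PySem.List.pyGetD cs j ' '   -- s[j]; in range under Pre_
    let st := if ch = 'a' then (a + 1, b, c)
              else if ch = 'b' then (a, b + 1, c)
              else if ch = 'c' then (a, b, c + 1)
              else (a, b, c)
    if st.1 > st.2.1 ∧ st.1 > st.2.2 ∧ j - i + 1 ≥ 2 then some (j - i + 1)
    else pvFirstAt cs i st rest

def findMinLength_alt (n : Int) (s : String) : Int :=
  let cs := s.toList
  let best := (PySem.List.pyRange 0 n 1).foldl
    (fun best i =>
      match pvFirstAt cs i (0, 0, 0) (PySem.List.pyRange i (min (i + 7) n) 1) with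
      | some L => if L < best then L else best
      | none => best) 8
  if best < 8 then best else -1

-- ===== PRECONDITION & SPEC =====
-- A indexes s[i] for i in range(n): it raises IndexError exactly when n > len(s)
-- (and so does B, which indexes s[j] for some j up to n-1 in that case).
def Pre_findMinLength (n : Int) (s : String) : Prop := n ≤ (s.toList.length : Int)
instance (n : Int) (s : String) : Decidable (Pre_findMinLength n s) := by
  unfold Pre_findMinLength; infer_instance

def pvWitness_findMinLength : Int × String := (4, "xbaa")

def Spec_findMinLength (n : Int) (s : String) (out : Int) : Prop := out = findMinLength_alt n s
instance (n : Int) (s : String) (out : Int) : Decidable (Spec_findMinLength n s out) := by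
  unfold Spec_findMinLength; infer_instance

-- ===== CLAIM (what is proved, stated in full; the proofs are below) =====
def Claim_equal_findMinLength : Prop := ∀ (n : Int) (s : String), Dom_findMinLength n s → Pre_findMinLength n s → Spec_findMinLength n s (findMinLength n s)

-- ===== LEMMAS AND PROOFS =====

-- common mathematical characterization: the window, its qualification test,
-- "some window of length L qualifies", and "first good length in a candidate list"
def pvWin (cs : List Char) (i L : Nat) : List Char := (cs.drop i).take L

def pvQual (w : List Char) : Bool := decide (w.count 'b' < w.count 'a' ∧ w.count 'c' < w.count 'a')

def pvGood (cs : List Char) (m L : Nat) : Bool :=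
  (List.range m).any fun i => decide (i + L ≤ m) && pvQual (pvWin cs i L)

def pvFind (cs : List Char) (m : Nat) : List Nat → Int
  | [] => -1
  | L :: r => if pvGood cs m L then (L : Int) else pvFind cs m r

-- ---------- A side: prefix sums = window counts ----------

-- the prefix list A's loop has built after m steps: counts of c in every take k, k ≤ m
def pvPref (cs : List Char) (c : Char) (m : Nat) : List Int :=
  (List.range (m + 1)).map (fun k => ((cs.take k).count c : Int))

theorem pvPref_succ (cs : List Char) (c : Char) (m : Nat) (h : m < cs.length) :
    pvPref cs c (m + 1)
      = pvPref cs c m ++ [((cs.take m).count c : Int) + (if cs[m] = c then 1 else 0)] := by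
  unfold pvPref
  rw [List.range_succ, List.map_append]
  congr 1
  rw [List.map_singleton, List.take_succ_eq_append_getElem h, List.count_append]
  congr 1
  push_cast
  congr 1
  simp [List.count_singleton]

theorem pvPref_getD (cs : List Char) (c : Char) (m k : Nat) (hk : k ≤ m) :
    PySem.List.pyGetD (pvPref cs c m) (k : Int) 0 = ((cs.take k).count c : Int) := by
  rw [PySem.List.pyGetD_natCast]
  exact PySem.List.getD_map_range _ _ _ _ (by omega)

theorem pvBuildA_eq (cs : List Char) (m : Nat) (hm : m ≤ cs.length) :
    pvBuildA cs (m : Int) = (pvPref cs 'a' m, pvPref cs 'b' m, pvPref cs 'c' m) := by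
  induction m with
  | zero => simp [pvBuildA, PySem.List.pyRange_one_eq_nil, pvPref]
  | succ m ih =>
    have hm' : m ≤ cs.length := by omega
    have hlt : m < cs.length := by omega
    unfold pvBuildA
    rw [show ((m + 1 : Nat) : Int) = (m : Int) + 1 by push_cast; ring,
        PySem.List.pyRange_one_succ_right (by positivity), List.foldl_append]
    have : (PySem.List.pyRange 0 (m:Int) 1).foldl
        (fun st i =>
          let ch := PySem.List.pyGetD cs i ' '
          (st.1   ++ [PySem.List.pyGetD st.1   i 0 + (if ch = 'a' then 1 else 0)],
           st.2.1 ++ [PySem.List.pyGetD st.2.1 i 0 + (if ch = 'b' then 1 else 0)],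
           st.2.2 ++ [PySem.List.pyGetD st.2.2 i 0 + (if ch = 'c' then 1 else 0)]))
        ([0], [0], [0]) = (pvPref cs 'a' m, pvPref cs 'b' m, pvPref cs 'c' m) := ih hm'
    rw [this]
    simp only [List.foldl_cons, List.foldl_nil]
    have hch : PySem.List.pyGetD cs (m:Int) ' ' = cs[m] := by
      rw [PySem.List.pyGetD_natCast]
      exact List.getD_eq_getElem _ _ hlt
    rw [hch, pvPref_getD cs 'a' m m le_rfl, pvPref_getD cs 'b' m m le_rfl,
        pvPref_getD cs 'c' m m le_rfl,
        pvPref_succ cs 'a' m hlt, pvPref_succ cs 'b' m hlt, pvPref_succ cs 'c' m hlt]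

theorem pvPref_count_diff (cs : List Char) (c : Char) (m : Nat)
    (i l : Int) (hi : 0 ≤ i) (hl : 0 ≤ l) (hil : i + l ≤ (m : Int)) :
    PySem.List.pyGetD (pvPref cs c m) (i + l) 0 - PySem.List.pyGetD (pvPref cs c m) i 0
      = ((PySem.List.slice cs (some i) (some (i + l))).count c : Int) := by
  obtain ⟨a, rfl⟩ := Int.eq_ofNat_of_zero_le hi
  obtain ⟨b, rfl⟩ := Int.eq_ofNat_of_zero_le hl
  rw [PySem.List.slice_natCast_add,
      show ((a : Int) + (b : Int)) = ((a + b : Nat) : Int) by push_cast; ring,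
      pvPref_getD cs c m (a + b) (by omega), pvPref_getD cs c m a (by omega),
      List.take_add, List.count_append]
  push_cast; ring

-- ---------- A side: the search with prefix sums = pvFind ----------

theorem pvInnerA_char (cs : List Char) (m : Nat) (l : Int) (hl : 0 ≤ l) :
    ∀ starts : List Int, (∀ i ∈ starts, 0 ≤ i ∧ i + l ≤ (m : Int)) →
    pvInnerA (pvPref cs 'a' m) (pvPref cs 'b' m) (pvPref cs 'c' m) l starts
      = if starts.any (fun i =>
            decide (((PySem.List.slice cs (some i) (some (i + l))).count 'b' : Int)
                      < ((PySem.List.slice cs (some i) (some (i + l))).count 'a' : Int)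
                  ∧ ((PySem.List.slice cs (some i) (some (i + l))).count 'c' : Int)
                      < ((PySem.List.slice cs (some i) (some (i + l))).count 'a' : Int)))
        then some l else none := by
  intro starts
  induction starts with
  | nil => intro _; simp [pvInnerA]
  | cons i rest ih =>
    intro h
    obtain ⟨hi, hil⟩ := h i (List.mem_cons_self ..)
    simp only [pvInnerA,
      pvPref_count_diff cs 'a' m i l hi hl hil,
      pvPref_count_diff cs 'b' m i l hi hl hil,
      pvPref_count_diff cs 'c' m i l hi hl hil]
    by_cases hq : ((PySem.List.slice cs (some i) (some (i + l))).count 'b' : Int)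
        < ((PySem.List.slice cs (some i) (some (i + l))).count 'a' : Int)
      ∧ ((PySem.List.slice cs (some i) (some (i + l))).count 'c' : Int)
        < ((PySem.List.slice cs (some i) (some (i + l))).count 'a' : Int)
    · rw [if_pos hq, List.any_cons, decide_eq_true hq, Bool.true_or, if_pos rfl]
    · rw [if_neg hq, ih (fun j hj => h j (List.mem_cons_of_mem _ hj)),
          List.any_cons, decide_eq_false hq, Bool.false_or]

theorem pvAny_eq_good (cs : List Char) (m l : Nat) (h2 : 2 ≤ l) (hlm : l ≤ m) :
    ((PySem.List.pyRange 0 ((m : Int) - (l : Int) + 1) 1).any (fun i =>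
        decide (((PySem.List.slice cs (some i) (some (i + (l : Int)))).count 'b' : Int)
                  < ((PySem.List.slice cs (some i) (some (i + (l : Int)))).count 'a' : Int)
              ∧ ((PySem.List.slice cs (some i) (some (i + (l : Int)))).count 'c' : Int)
                  < ((PySem.List.slice cs (some i) (some (i + (l : Int)))).count 'a' : Int))))
      = pvGood cs m l := by
  rw [Bool.eq_iff_iff, List.any_eq_true]
  unfold pvGood
  rw [List.any_eq_true]
  constructor
  · rintro ⟨i, hi, hq⟩
    rw [PySem.List.mem_pyRange_one] at hi
    obtain ⟨j, rfl⟩ := Int.eq_ofNat_of_zero_le hi.1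
    refine ⟨j, List.mem_range.mpr (by omega), ?_⟩
    rw [Bool.and_eq_true, decide_eq_true_iff]
    refine ⟨by omega, ?_⟩
    rw [decide_eq_true_iff] at hq
    simp only [PySem.List.slice_natCast_add] at hq
    unfold pvQual pvWin
    rw [decide_eq_true_iff]
    exact ⟨by exact_mod_cast hq.1, by exact_mod_cast hq.2⟩
  · rintro ⟨j, hj, hq⟩
    rw [List.mem_range] at hj
    rw [Bool.and_eq_true, decide_eq_true_iff] at hq
    obtain ⟨hjl, hw⟩ := hq
    unfold pvQual pvWin at hw
    rw [decide_eq_true_iff] at hw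
    refine ⟨(j : Int), PySem.List.mem_pyRange_one.mpr ⟨by positivity, by omega⟩, ?_⟩
    rw [decide_eq_true_iff]
    simp only [PySem.List.slice_natCast_add]
    exact ⟨by exact_mod_cast hw.1, by exact_mod_cast hw.2⟩

theorem pvGood_false_of_gt (cs : List Char) (m L : Nat) (h : m < L) :
    pvGood cs m L = false := by
  unfold pvGood
  rw [List.any_eq_false]
  intro i hi
  rw [List.mem_range] at hi
  simp [show ¬ (i + L ≤ m) by omega]

theorem pvFind_neg (cs : List Char) (m : Nat) :
    ∀ ls : List Nat, (∀ L ∈ ls, m < L) → pvFind cs m ls = -1 := by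
  intro ls
  induction ls with
  | nil => intro _; rfl
  | cons l rest ih =>
    intro h
    unfold pvFind
    rw [pvGood_false_of_gt cs m l (h l (List.mem_cons_self ..))]
    simpa using ih (fun L hL => h L (List.mem_cons_of_mem _ hL))

theorem pvOuterA_eq_find (cs : List Char) (m : Nat) :
    ∀ ls : List Nat, (∀ L ∈ ls, 2 ≤ L) → ls.Pairwise (· ≤ ·) →
    pvOuterA (m : Int) (pvPref cs 'a' m) (pvPref cs 'b' m) (pvPref cs 'c' m)
        (ls.map (fun L : Nat => (L : Int)))
      = pvFind cs m ls := by
  intro ls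
  induction ls with
  | nil => intro _ _; rfl
  | cons l rest ih =>
    intro h2 hmono
    rw [List.pairwise_cons] at hmono
    by_cases hlm : l ≤ m
    · have hl2 : 2 ≤ l := h2 l (List.mem_cons_self ..)
      simp only [List.map_cons, pvOuterA]
      rw [if_neg (by push_cast; omega)]
      rw [pvInnerA_char cs m (l : Int) (by positivity) _
            (fun i hi => by
              rw [PySem.List.mem_pyRange_one] at hi
              exact ⟨hi.1, by omega⟩)]
      rw [pvAny_eq_good cs m l hl2 hlm]
      unfold pvFind
      by_cases hg : pvGood cs m l = true
      · simp [hg]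
      · rw [Bool.not_eq_true] at hg
        simp only [hg, Bool.false_eq_true, if_false]
        exact ih (fun L hL => h2 L (List.mem_cons_of_mem _ hL)) hmono.2
    · simp only [List.map_cons, pvOuterA]
      rw [if_pos (by push_cast; omega)]
      unfold pvFind
      rw [pvGood_false_of_gt cs m l (by omega)]
      simp only [Bool.false_eq_true, if_false]
      exact (pvFind_neg cs m rest (fun L hL => by have := hmono.1 L hL; omega)).symm

-- ---------- B side: pvFirstAt = least qualifying length at a start ----------

-- least L with t < L ≤ t + fuel, 2 ≤ L and pvQual (pvWin cs i L); fuel-structured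
def pvLeastAux (cs : List Char) (i : Nat) : Nat → Nat → Option Nat
  | _, 0 => none
  | t, fuel + 1 =>
    if 2 ≤ t + 1 ∧ pvQual (pvWin cs i (t + 1)) = true then some (t + 1)
    else pvLeastAux cs i (t + 1) fuel

theorem pvWin_succ (cs : List Char) (i t : Nat) (h : i + t < cs.length) :
    pvWin cs i (t + 1) = pvWin cs i t ++ [cs[i + t]] := by
  unfold pvWin
  have ht : t < (cs.drop i).length := by simp; omega
  rw [List.take_succ_eq_append_getElem ht]
  congr 2
  simp [List.getElem_drop]

theorem pvFirstAt_eq (cs : List Char) (m : Nat) (hm : m ≤ cs.length) (i : Nat) :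
    ∀ fuel t, i + t + fuel ≤ m →
    pvFirstAt cs (i : Int)
        (((pvWin cs i t).count 'a' : Int), ((pvWin cs i t).count 'b' : Int),
         ((pvWin cs i t).count 'c' : Int))
        (PySem.List.pyRange ((i + t : Nat) : Int) ((i + t + fuel : Nat) : Int) 1)
      = (pvLeastAux cs i t fuel).map (fun L : Nat => (L : Int)) := by
  intro fuel
  induction fuel with
  | zero =>
    intro t _
    rw [PySem.List.pyRange_one_eq_nil (by simp)]
    rfl
  | succ fuel ih =>
    intro t hb
    have hidx : i + t < cs.length := by omega
    rw [PySem.List.pyRange_one_cons (by exact_mod_cast Nat.lt_add_of_pos_right (by omega))]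
    simp only [pvFirstAt]
    have hch : PySem.List.pyGetD cs ((i + t : Nat) : Int) ' ' = cs[i + t] := by
      rw [PySem.List.pyGetD_natCast]
      exact List.getD_eq_getElem _ _ hidx
    rw [hch]
    have hwin := pvWin_succ cs i t hidx
    -- the updated counter triple is the counts of the grown window
    have hstep :
        (if cs[i + t] = 'a' then
            (((pvWin cs i t).count 'a' : Int) + 1, ((pvWin cs i t).count 'b' : Int),
             ((pvWin cs i t).count 'c' : Int))
         else if cs[i + t] = 'b' then
            (((pvWin cs i t).count 'a' : Int), ((pvWin cs i t).count 'b' : Int) + 1,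
             ((pvWin cs i t).count 'c' : Int))
         else if cs[i + t] = 'c' then
            (((pvWin cs i t).count 'a' : Int), ((pvWin cs i t).count 'b' : Int),
             ((pvWin cs i t).count 'c' : Int) + 1)
         else
            (((pvWin cs i t).count 'a' : Int), ((pvWin cs i t).count 'b' : Int),
             ((pvWin cs i t).count 'c' : Int)))
        = (((pvWin cs i (t + 1)).count 'a' : Int), ((pvWin cs i (t + 1)).count 'b' : Int),
           ((pvWin cs i (t + 1)).count 'c' : Int)) := by
      rw [hwin]
      by_cases ha : cs[i + t] = 'a'
      · simp [ha, List.count_append]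
      · by_cases hbc : cs[i + t] = 'b'
        · simp [hbc, List.count_append]
        · by_cases hc : cs[i + t] = 'c'
          · simp [ha, hc, List.count_append]
          · simp [ha, hbc, hc, List.count_append]
    rw [hstep]
    by_cases hg : ((pvWin cs i (t + 1)).count 'b' : Int) < ((pvWin cs i (t + 1)).count 'a' : Int)
        ∧ ((pvWin cs i (t + 1)).count 'c' : Int) < ((pvWin cs i (t + 1)).count 'a' : Int)
        ∧ 2 ≤ t + 1
    · rw [if_pos (by
        refine ⟨hg.1, hg.2.1, ?_⟩
        have : ((i + t : Nat) : Int) - (i : Nat) + 1 = ((t + 1 : Nat) : Int) := by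
          push_cast; ring
        rw [this]; exact_mod_cast hg.2.2)]
      unfold pvLeastAux
      have hqq : pvQual (pvWin cs i (t + 1)) = true := by
        unfold pvQual
        rw [decide_eq_true_iff]
        exact ⟨by exact_mod_cast hg.1, by exact_mod_cast hg.2.1⟩
      rw [if_pos ⟨by omega, hqq⟩]
      simp only [Option.map_some]
      congr 1
      push_cast; ring
    · rw [if_neg (by
        intro hcon
        apply hg
        refine ⟨hcon.1, hcon.2.1, ?_⟩
        have hv := hcon.2.2
        have : ((i + t : Nat) : Int) - (i : Nat) + 1 = ((t + 1 : Nat) : Int) := by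
          push_cast; ring
        rw [this] at hv
        exact_mod_cast hv)]
      unfold pvLeastAux
      rw [if_neg (by
        intro hcon
        apply hg
        have hq := hcon.2
        unfold pvQual at hq
        rw [decide_eq_true_iff] at hq
        exact ⟨by exact_mod_cast hq.1, by exact_mod_cast hq.2, hcon.1⟩)]
      have harg : ((i + t : Nat) : Int) + 1 = ((i + (t + 1) : Nat) : Int) := by push_cast; ring
      have harg2 : ((i + t + (fuel + 1) : Nat) : Int) = ((i + (t + 1) + fuel : Nat) : Int) := by
        push_cast; ring
      rw [harg, harg2]
      exact ih (t + 1) (by omega)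

theorem pvLeastAux_some (cs : List Char) (i : Nat) :
    ∀ fuel t L, pvLeastAux cs i t fuel = some L →
      t < L ∧ L ≤ t + fuel ∧ 2 ≤ L ∧ pvQual (pvWin cs i L) = true := by
  intro fuel
  induction fuel with
  | zero => intro t L h; simp [pvLeastAux] at h
  | succ fuel ih =>
    intro t L h
    unfold pvLeastAux at h
    split_ifs at h with hc
    · obtain rfl : t + 1 = L := by injection h
      exact ⟨by omega, by omega, hc.1, hc.2⟩
    · have := ih (t + 1) L h
      exact ⟨by omega, by omega, this.2.2⟩

theorem pvLeastAux_le (cs : List Char) (i : Nat) :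
    ∀ fuel t L, t < L → L ≤ t + fuel → 2 ≤ L → pvQual (pvWin cs i L) = true →
      ∃ L', L' ≤ L ∧ pvLeastAux cs i t fuel = some L' := by
  intro fuel
  induction fuel with
  | zero => intro t L h1 h2 _ _; omega
  | succ fuel ih =>
    intro t L h1 h2 h3 h4
    unfold pvLeastAux
    split_ifs with hc
    · exact ⟨t + 1, by omega, rfl⟩
    · by_cases hL : L = t + 1
      · exact absurd ⟨by omega, hL ▸ h4⟩ hc
      · obtain ⟨L', hle, heq⟩ := ih (t + 1) L (by omega) (by omega) h3 h4
        exact ⟨L', hle, heq⟩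

-- the value pvFirstAt produces at start i (in the mathematical Nat world)
def pvG (cs : List Char) (m i : Nat) : Option Nat := pvLeastAux cs i 0 (min 7 (m - i))

def pvStep (cs : List Char) (m : Nat) (best : Int) (i : Nat) : Int :=
  match pvG cs m i with
  | some L => if (L : Int) < best then (L : Int) else best
  | none => best

theorem pvFold_le_seed (cs : List Char) (m : Nat) :
    ∀ (ls : List Nat) (s0 : Int), (ls.foldl (pvStep cs m) s0) ≤ s0 := by
  intro ls
  induction ls with
  | nil => intro s0; simp
  | cons i rest ih =>
    intro s0
    simp only [List.foldl_cons]
    refine le_trans (ih _) ?_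
    unfold pvStep
    cases h : pvG cs m i with
    | none => simp
    | some L => simp only; split_ifs with hlt <;> omega

theorem pvFold_le_val (cs : List Char) (m : Nat) :
    ∀ (ls : List Nat) (s0 : Int) (i L : Nat), i ∈ ls → pvG cs m i = some L →
      (ls.foldl (pvStep cs m) s0) ≤ (L : Int) := by
  intro ls
  induction ls with
  | nil => intro _ _ _ h; simp at h
  | cons i' rest ih =>
    intro s0 i L hmem hG
    simp only [List.foldl_cons]
    rcases List.mem_cons.mp hmem with rfl | hmem'
    · refine le_trans (pvFold_le_seed cs m rest _) ?_
      unfold pvStep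
      rw [hG]
      simp only; split_ifs with hlt <;> omega
    · exact ih _ i L hmem' hG

theorem pvFold_attained (cs : List Char) (m : Nat) :
    ∀ (ls : List Nat) (s0 : Int),
      (ls.foldl (pvStep cs m) s0) = s0
      ∨ ∃ i ∈ ls, ∃ L, pvG cs m i = some L ∧ (ls.foldl (pvStep cs m) s0) = (L : Int) := by
  intro ls
  induction ls with
  | nil => intro s0; left; rfl
  | cons i rest ih =>
    intro s0
    simp only [List.foldl_cons]
    rcases ih (pvStep cs m s0 i) with hs | ⟨j, hj, L, hGL, hval⟩
    · cases hG : pvG cs m i with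
      | none =>
        left
        rw [hs]
        unfold pvStep
        rw [hG]
      | some L =>
        by_cases hlt : (L : Int) < s0
        · right
          refine ⟨i, List.mem_cons_self .., L, hG, ?_⟩
          rw [hs]
          unfold pvStep
          rw [hG]
          simp [hlt]
        · left
          rw [hs]
          unfold pvStep
          rw [hG]
          simp [hlt]
    · right; exact ⟨j, List.mem_cons_of_mem _ hj, L, hGL, hval⟩

-- pvG values correspond exactly to good lengths
theorem pvG_some_good (cs : List Char) (m i L : Nat) (him : i < m)
    (h : pvG cs m i = some L) : 2 ≤ L ∧ L ≤ 7 ∧ pvGood cs m L = true := by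
  obtain ⟨h1, h2, h3, h4⟩ := pvLeastAux_some cs i _ 0 L h
  refine ⟨h3, by omega, ?_⟩
  unfold pvGood
  rw [List.any_eq_true]
  exact ⟨i, List.mem_range.mpr him, by
    rw [Bool.and_eq_true, decide_eq_true_iff]
    exact ⟨by omega, h4⟩⟩

theorem pvGood_gives_G (cs : List Char) (m L : Nat) (h2 : 2 ≤ L) (h7 : L ≤ 7)
    (hg : pvGood cs m L = true) :
    ∃ i L', i < m ∧ L' ≤ L ∧ pvG cs m i = some L' := by
  unfold pvGood at hg
  rw [List.any_eq_true] at hg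
  obtain ⟨i, hi, hq⟩ := hg
  rw [List.mem_range] at hi
  rw [Bool.and_eq_true, decide_eq_true_iff] at hq
  obtain ⟨L', hle, heq⟩ := pvLeastAux_le cs i (min 7 (m - i)) 0 L (by omega)
    (by omega) h2 hq.2
  exact ⟨i, L', hi, hle, heq⟩

-- B's fold (over List.range m) in terms of pvStep
theorem pvAlt_fold (cs : List Char) (m : Nat) (hm : m ≤ cs.length) :
    (PySem.List.pyRange 0 (m : Int) 1).foldl
      (fun best i =>
        match pvFirstAt cs i (0, 0, 0) (PySem.List.pyRange i (min (i + 7) (m : Int)) 1) with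
        | some L => if L < best then L else best
        | none => best) 8
    = (List.range m).foldl (pvStep cs m) 8 := by
  rw [PySem.List.pyRange_zero_natCast, List.foldl_map]
  apply PySem.List.foldl_congr_mem
  intro best i hi
  rw [List.mem_range] at hi
  have hrange : PySem.List.pyRange (i : Int) (min ((i : Int) + 7) (m : Int)) 1
      = PySem.List.pyRange ((i + 0 : Nat) : Int) ((i + 0 + min 7 (m - i) : Nat) : Int) 1 := by
    congr 1
    all_goals push_cast; omega
  have h0 : ((0 : Int), (0 : Int), (0 : Int))
      = (((pvWin cs i 0).count 'a' : Int), ((pvWin cs i 0).count 'b' : Int),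
         ((pvWin cs i 0).count 'c' : Int)) := by
    simp [pvWin]
  rw [hrange, h0, pvFirstAt_eq cs m hm i (min 7 (m - i)) 0 (by omega)]
  unfold pvStep pvG
  cases pvLeastAux cs i 0 (min 7 (m - i)) with
  | none => rfl
  | some L => rfl

-- pvFind over the concrete candidate list [2..7]
theorem pvFind_eq_of_least (cs : List Char) (m k : Nat) (h2 : 2 ≤ k) (h7 : k ≤ 7)
    (hg : pvGood cs m k = true)
    (hf : ∀ L, 2 ≤ L → L < k → pvGood cs m L = false) :
    pvFind cs m [2, 3, 4, 5, 6, 7] = (k : Int) := by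
  interval_cases k <;>
    simp_all [pvFind, hf 2, hf 3, hf 4, hf 5, hf 6]

theorem pvFind_eq_neg (cs : List Char) (m : Nat)
    (hf : ∀ L, 2 ≤ L → L ≤ 7 → pvGood cs m L = false) :
    pvFind cs m [2, 3, 4, 5, 6, 7] = -1 := by
  simp [pvFind, hf 2 (by omega) (by omega), hf 3 (by omega) (by omega),
    hf 4 (by omega) (by omega), hf 5 (by omega) (by omega),
    hf 6 (by omega) (by omega), hf 7 (by omega) (by omega)]

-- the B side equals pvFind [2..7]
theorem pvAlt_eq_find (cs : List Char) (m : Nat) (hm : m ≤ cs.length) :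
    (if ((List.range m).foldl (pvStep cs m) 8) < 8
      then (List.range m).foldl (pvStep cs m) 8 else -1)
    = pvFind cs m [2, 3, 4, 5, 6, 7] := by
  by_cases hex : ∃ L, 2 ≤ L ∧ L ≤ 7 ∧ pvGood cs m L = true
  · set k := Nat.find hex with hk
    obtain ⟨hk2, hk7, hkg⟩ := Nat.find_spec hex
    have hmin : ∀ L, 2 ≤ L → L < k → pvGood cs m L = false := by
      intro L hL2 hLk
      have := Nat.find_min hex hLk
      by_contra hc
      rw [Bool.not_eq_false] at hc
      exact this ⟨hL2, by omega, hc⟩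
    -- best = k
    obtain ⟨i, L', him, hle, hG⟩ := pvGood_gives_G cs m k hk2 hk7 hkg
    have hub : ((List.range m).foldl (pvStep cs m) 8) ≤ (L' : Int) :=
      pvFold_le_val cs m _ 8 i L' (List.mem_range.mpr him) hG
    have hbest : ((List.range m).foldl (pvStep cs m) 8) = (k : Int) := by
      rcases pvFold_attained cs m (List.range m) 8 with h8 | ⟨j, hj, L0, hGL0, hval⟩
      · omega
      · rw [List.mem_range] at hj
        obtain ⟨hL02, hL07, hL0g⟩ := pvG_some_good cs m j L0 hj hGL0
        have hkle : k ≤ L0 := Nat.find_min' hex ⟨hL02, hL07, hL0g⟩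
        rw [hval]
        have : (k : Int) ≤ L0 := by exact_mod_cast hkle
        have : ((List.range m).foldl (pvStep cs m) 8) ≤ (k : Int) := by omega
        omega
    rw [pvFind_eq_of_least cs m k hk2 hk7 hkg hmin]
    rw [if_pos (by omega : ((List.range m).foldl (pvStep cs m) 8) < (8:Int)), hbest]
  · push_neg at hex
    have hf : ∀ L, 2 ≤ L → L ≤ 7 → pvGood cs m L = false := by
      intro L h1 h2
      have := hex L h1 h2
      exact Bool.not_eq_true _ |>.mp this
    have hbest : ((List.range m).foldl (pvStep cs m) 8) = 8 := by
      rcases pvFold_attained cs m (List.range m) 8 with h8 | ⟨j, hj, L0, hGL0, hval⟩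
      · exact h8
      · rw [List.mem_range] at hj
        obtain ⟨hL02, hL07, hL0g⟩ := pvG_some_good cs m j L0 hj hGL0
        exact absurd hL0g (by simp [hf L0 hL02 hL07])
    rw [pvFind_eq_neg cs m hf, hbest]
    norm_num

-- B's port equals pvFind [2..7] (top-level form)
theorem pvAlt_val (s : String) (m : Nat) (hm : m ≤ s.toList.length) :
    findMinLength_alt ((m : Nat) : Int) s = pvFind s.toList m [2, 3, 4, 5, 6, 7] := by
  simp only [findMinLength_alt]
  rw [pvAlt_fold s.toList m hm]
  exact pvAlt_eq_find s.toList m hm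

-- ===== VERDICT (by name: the statement is the Claim_ definition above) =====
theorem findMinLength_spec : Claim_equal_findMinLength := by
  intro n s _ hpre
  unfold Pre_findMinLength at hpre
  unfold Spec_findMinLength
  by_cases hneg : n < 0
  · unfold findMinLength
    rw [show PySem.List.pyRange 2 8 1 = [2, 3, 4, 5, 6, 7] from by decide]
    simp only [pvOuterA]
    rw [if_pos (by omega : (2 : Int) > n)]
    simp only [findMinLength_alt]
    rw [PySem.List.pyRange_one_eq_nil (le_of_lt hneg)]
    norm_num
  · obtain ⟨m, rfl⟩ := Int.eq_ofNat_of_zero_le (by omega : (0 : Int) ≤ n)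
    have hm : m ≤ s.toList.length := by exact_mod_cast hpre
    rw [pvAlt_val s m hm]
    unfold findMinLength
    rw [pvBuildA_eq s.toList m hm]
    rw [show PySem.List.pyRange 2 8 1 = [2, 3, 4, 5, 6, 7].map (fun L : Nat => (L : Int))
        from by decide]
    exact pvOuterA_eq_find s.toList m [2, 3, 4, 5, 6, 7] (by decide) (by decide)
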